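-- pv_equiv track=rewrite | github.com/centuryhopper/practice_interview_problems | python/leetcode_questions/ambiguous_coordinates.py | getValidStringSets
-- ===== SOURCE A (Python) =====
-- def getValidStringSets(s) -> set[str]:
--     n = len(s)
--     st = set()
--
--     # sandwiching case
--     if s[0] == '0' and s[n-1] == '0':
--         return set('0') if n == 1 else set()
--     # trailing zero case
--     if s[n-1] == '0':
--         st.add(s)
--         return st
--     # leading zero case
--     if s[0] == '0':
--         st.add('0.' + s[1:])
--         return st
--
--     # cases without any zeros in the string
--     for i in range(1, n):
--         st.add(s[:i]+'.'+s[i:])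
--     # don't forget the original string as it is valid as well
--     st.add(s)
--     return st
-- ===== SOURCE B (Python) =====
-- def getValidStringSets(s) -> set[str]:
--     st = set()
--     for i in range(1, len(s)):
--         left, right = s[:i], s[i:]
--         if (len(left) == 1 or left[0] != '0') and right[-1] != '0':
--             st.add(left + '.' + right)
--     if len(s) == 1 or s[0] != '0':
--         st.add(s)
--     return st
-- ===== Notes on version B (the rewrite author's own statement) =====
-- stated objective: alternative
-- what changed: Replaces A's four-way case tree on leading/trailing zeros with a single generate-and-filter pass: every split position is tried and kept iff a uniform validity predicate (no leading zero unless length 1, no trailing zero after the dot) holds.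
import Mathlib
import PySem

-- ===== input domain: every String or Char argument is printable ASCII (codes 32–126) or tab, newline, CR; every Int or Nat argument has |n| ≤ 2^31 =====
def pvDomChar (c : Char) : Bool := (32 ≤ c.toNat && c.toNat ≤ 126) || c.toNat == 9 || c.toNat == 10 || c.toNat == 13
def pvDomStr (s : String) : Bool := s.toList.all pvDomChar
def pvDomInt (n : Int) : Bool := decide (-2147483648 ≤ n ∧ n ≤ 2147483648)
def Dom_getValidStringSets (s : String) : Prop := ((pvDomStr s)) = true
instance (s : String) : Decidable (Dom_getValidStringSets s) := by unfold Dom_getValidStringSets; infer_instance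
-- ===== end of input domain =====

-- B replaces A's four-way leading/trailing-zero case tree with a single generate-and-filter
-- pass over all split positions (objective: alternative; equal cost).


-- ===== PORT A =====
-- loop body of A's final for-loop: st.add(s[:i] + '.' + s[i:]); Python '+' on strings is
-- modelled on the code-point list side (String.ofList of the concatenated char lists), exact
def bodyA (s : String) : List String → Int → List String := fun st i =>
  PySem.Set.add st
    (String.ofList ((PySem.Str.slice s none (some i)).toList
      ++ '.' :: (PySem.Str.slice s (some i) none).toList))

def getValidStringSets (s : String) : List String :=
  let n : Int := PySem.Str.len s
  match PySem.Str.pyGet? s 0, PySem.Str.pyGet? s (n - 1) with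
  | some c0, some cn =>
      if c0 = '0' ∧ cn = '0' then
        (if n = 1 then PySem.Set.ofList ["0"] else PySem.Set.empty)
      else if cn = '0' then
        PySem.Set.add PySem.Set.empty s
      else if c0 = '0' then
        PySem.Set.add PySem.Set.empty
          (String.ofList ('0' :: '.' :: (PySem.Str.slice s (some 1) none).toList))
      else
        PySem.Set.add ((PySem.List.pyRange 1 n 1).foldl (bodyA s) PySem.Set.empty) s
  | _, _ => []   -- s = "": Python raises IndexError; excluded by Pre_

-- ===== PORT B =====
-- loop body of B: try the split at i, keep it iff the validity predicate holds
def bodyB (s : String) : List String → Int → List String := fun st i =>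
  let left := PySem.Str.slice s none (some i)
  let right := PySem.Str.slice s (some i) none
  if (PySem.Str.len left = 1 ∨ PySem.Str.pyGet? left 0 ≠ some '0')
      ∧ PySem.Str.pyGet? right (-1) ≠ some '0'
  then PySem.Set.add st (String.ofList (left.toList ++ '.' :: right.toList))
  else st

def getValidStringSets_alt (s : String) : List String :=
  let st := (PySem.List.pyRange 1 (PySem.Str.len s) 1).foldl (bodyB s) PySem.Set.empty
  if PySem.Str.len s = 1 then PySem.Set.add st s
  else
    match PySem.Str.pyGet? s 0 with
    | some c0 => if c0 ≠ '0' then PySem.Set.add st s else st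
    | none => st   -- s = "": Python raises IndexError; excluded by Pre_

-- ===== PRECONDITION & SPEC =====
-- Pre_ excludes only the empty string, on which both Pythons raise IndexError (s[0]).
def Pre_getValidStringSets (s : String) : Prop := s ≠ ""
instance (s : String) : Decidable (Pre_getValidStringSets s) := by
  unfold Pre_getValidStringSets; infer_instance
def pvWitness_getValidStringSets : String := "102"
def Spec_getValidStringSets (s : String) (out : List String) : Prop := out = getValidStringSets_alt s
instance (s : String) (out : List String) : Decidable (Spec_getValidStringSets s out) := by unfold Spec_getValidStringSets; infer_instance
-- ===== CLAIM (what is proved, stated in full; the proofs are below) =====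
def Claim_equal_getValidStringSets : Prop := ∀ (s : String), Dom_getValidStringSets s → Pre_getValidStringSets s → Spec_getValidStringSets s (getValidStringSets s)

-- ===== LEMMAS AND PROOFS =====
lemma getLast?_drop_eq {α : Type} (l : List α) (k : Nat) (h : k < l.length) :
    (l.drop k).getLast? = l.getLast? := by
  induction l generalizing k with
  | nil => simp at h
  | cons a t ih =>
    cases k with
    | zero => simp
    | succ m =>
      simp only [List.drop_succ_cons]
      rw [ih m (by simpa using h)]
      cases t with
      | nil => simp at h
      | cons b u => simp [List.getLast?_cons_cons]

lemma head?_take_eq {α : Type} (l : List α) (k : Nat) (h : 1 ≤ k) :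
    (l.take k).head? = l.head? := by
  cases l with
  | nil => simp
  | cons a t => cases k with | zero => omega | succ m => simp

-- last char of the right part of a split = last char of s
lemma right_last (s : String) (i : Int) (h1 : 1 ≤ i) (h2 : i < (s.toList.length : Int)) :
    PySem.Str.pyGet? (PySem.Str.slice s (some i) none) (-1) = s.toList.getLast? := by
  simp only [PySem.Str.pyGet?_eq, PySem.Chars.pyGet?_eq_listPyGet?, PySem.Str.toList_slice,
    PySem.Chars.slice_eq_listSlice, PySem.List.pyGet?_neg_one]
  rw [PySem.List.slice_from _ (by omega : (0:Int) ≤ i)]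
  exact getLast?_drop_eq _ _ (by omega)

-- first char of the left part of a split = first char of s
lemma left_head (s : String) (i : Int) (h1 : 1 ≤ i) :
    PySem.Str.pyGet? (PySem.Str.slice s none (some i)) 0 = s.toList.head? := by
  simp only [PySem.Str.pyGet?_eq, PySem.Chars.pyGet?_eq_listPyGet?, PySem.Str.toList_slice,
    PySem.Chars.slice_eq_listSlice, PySem.List.pyGet?_zero]
  rw [PySem.List.slice_to _ (by omega : (0:Int) ≤ i)]
  rw [← List.head?_eq_getElem?]
  exact head?_take_eq _ _ (by omega)

lemma left_len (s : String) (i : Int) (h1 : 0 ≤ i) (h2 : i ≤ (s.toList.length : Int)) :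
    PySem.Str.len (PySem.Str.slice s none (some i)) = i := by
  simp only [PySem.Str.len_eq, PySem.Str.toList_slice, PySem.Chars.slice_eq_listSlice]
  rw [PySem.List.slice_to _ h1, List.length_take_of_le (by omega)]
  omega

-- trailing zero: B's loop keeps nothing
lemma foldB_last0 (s : String) (init : List String)
    (h : s.toList.getLast? = some '0') :
    (PySem.List.pyRange 1 (PySem.Str.len s) 1).foldl (bodyB s) init = init := by
  rw [PySem.List.foldl_congr_mem _ (bodyB s) (fun st _ => st) init ?_]
  · exact List.foldl_fixed' (fun _ => rfl) _
  · intro acc i hi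
    rw [PySem.List.mem_pyRange_one] at hi
    simp only [PySem.Str.len_eq] at hi
    simp only [bodyB]
    rw [if_neg]
    rintro ⟨-, h2⟩
    exact h2 ((right_last s i hi.1 hi.2).trans h)

-- no leading and no trailing zero: B's loop keeps every split, i.e. equals A's loop
lemma foldB_all (s : String) (init : List String)
    (hh : s.toList.head? ≠ some '0') (hl : s.toList.getLast? ≠ some '0') :
    (PySem.List.pyRange 1 (PySem.Str.len s) 1).foldl (bodyB s) init
      = (PySem.List.pyRange 1 (PySem.Str.len s) 1).foldl (bodyA s) init := by
  apply PySem.List.foldl_congr_mem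
  intro acc i hi
  rw [PySem.List.mem_pyRange_one] at hi
  simp only [PySem.Str.len_eq] at hi
  have hp : (PySem.Str.len (PySem.Str.slice s none (some i)) = 1 ∨
      PySem.Str.pyGet? (PySem.Str.slice s none (some i)) 0 ≠ some '0')
      ∧ PySem.Str.pyGet? (PySem.Str.slice s (some i) none) (-1) ≠ some '0' :=
    ⟨Or.inr (fun hc => hh ((left_head s i hi.1).symm.trans hc)),
     fun hc => hl ((right_last s i hi.1 hi.2).symm.trans hc)⟩
  simp only [bodyB, bodyA]
  rw [if_pos hp]

-- leading zero, no trailing zero: B's loop keeps exactly the split after the first char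
lemma foldB_lead0 (s : String) (init : List String)
    (hh : s.toList.head? = some '0') (hl : s.toList.getLast? ≠ some '0')
    (hn : 1 < s.toList.length) :
    (PySem.List.pyRange 1 (PySem.Str.len s) 1).foldl (bodyB s) init
      = PySem.Set.add init
          (String.ofList ('0' :: '.' :: (PySem.Str.slice s (some 1) none).toList)) := by
  have hsplit : PySem.List.pyRange 1 (PySem.Str.len s) 1
      = 1 :: PySem.List.pyRange 2 (PySem.Str.len s) 1 := by
    have := PySem.List.pyRange_one_cons (a := 1) (b := PySem.Str.len s)
      (by simp only [PySem.Str.len_eq]; omega)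
    simpa using this
  rw [hsplit, List.foldl_cons]
  have hb1 : bodyB s init 1
      = PySem.Set.add init
          (String.ofList ('0' :: '.' :: (PySem.Str.slice s (some 1) none).toList)) := by
    have hp : (PySem.Str.len (PySem.Str.slice s none (some 1)) = 1 ∨
        PySem.Str.pyGet? (PySem.Str.slice s none (some 1)) 0 ≠ some '0')
        ∧ PySem.Str.pyGet? (PySem.Str.slice s (some 1) none) (-1) ≠ some '0' :=
      ⟨Or.inl (left_len s 1 (by omega) (by omega)),
        fun hc => hl ((right_last s 1 (by omega) (by omega)).symm.trans hc)⟩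
    have hleft : (PySem.Str.slice s none (some 1)).toList = ['0'] := by
      simp only [PySem.Str.toList_slice, PySem.Chars.slice_eq_listSlice]
      rw [PySem.List.slice_to _ (by omega : (0:Int) ≤ 1)]
      cases h : s.toList with
      | nil => simp [h] at hn
      | cons a t =>
        rw [h] at hh; simp at hh
        simp [hh]
    simp only [bodyB]
    rw [if_pos hp, hleft]
    rfl
  rw [hb1]
  rw [PySem.List.foldl_congr_mem _ (bodyB s) (fun st _ => st) _ ?_]
  · exact List.foldl_fixed' (fun _ => rfl) _
  · intro acc i hi
    rw [PySem.List.mem_pyRange_one] at hi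
    simp only [PySem.Str.len_eq] at hi
    simp only [bodyB]
    rw [if_neg]
    rintro ⟨h1, -⟩
    rcases h1 with h1 | h1
    · rw [left_len s i (by omega) (by omega)] at h1; omega
    · exact h1 ((left_head s i (by omega)).trans hh)

-- ===== VERDICT (by name: the statement is the Claim_ definition above) =====
theorem getValidStringSets_spec : Claim_equal_getValidStringSets := by
  intro s _ hpre
  unfold Spec_getValidStringSets
  have hs : s.toList ≠ [] := by
    intro h
    apply hpre
    have := String.ofList_toList (s := s); rw [h] at this; exact this.symm ▸ rfl
  obtain ⟨c, t, hct⟩ : ∃ c t, s.toList = c :: t := by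
    cases h : s.toList with
    | nil => exact absurd h hs
    | cons a u => exact ⟨a, u, rfl⟩
  have hn1 : 1 ≤ s.toList.length := by rw [hct]; simp
  have h0 : PySem.Str.pyGet? s 0 = some c := by simp [hct]
  have hlastGet : PySem.Str.pyGet? s (PySem.Str.len s - 1) = some (s.toList.getLast hs) := by
    simp only [PySem.Str.pyGet?_eq, PySem.Chars.pyGet?_eq_listPyGet?, PySem.Str.len_eq]
    have : ((s.toList.length : Int) - 1) = ((s.toList.length - 1 : Nat) : Int) := by omega
    rw [this, PySem.List.pyGet?_natCast, List.getElem?_eq_getElem (by omega)]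
    exact congrArg some (List.getLast_eq_getElem hs).symm
  have hlast? : s.toList.getLast? = some (s.toList.getLast hs) :=
    List.getLast?_eq_some_getLast hs
  set last := s.toList.getLast hs with hlastdef
  simp only [getValidStringSets, getValidStringSets_alt, h0, hlastGet]
  by_cases hone : PySem.Str.len s = 1
  -- n = 1 : t = []
  · have ht : t = [] := by
      simp only [PySem.Str.len_eq, hct] at hone
      simpa using (by exact_mod_cast hone : t.length + 1 = 1)
    have hcl : last = c := by
      have h2 : s.toList.getLast? = some c := by rw [hct, ht]; rfl
      rw [hlast?] at h2
      exact Option.some.inj h2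
    have hrange : PySem.List.pyRange 1 (PySem.Str.len s) 1 = [] := by rw [hone]; rfl
    rw [hrange]
    by_cases hc : c = '0'
    · have hs0 : s = "0" := by
        rw [← String.ofList_toList (s := s), hct, ht, hc]
      rw [if_pos ⟨hc, hcl.trans hc⟩, if_pos hone, if_pos hone, hs0]
      rfl
    · have hncl : ¬ last = '0' := fun h => hc (hcl.symm.trans h)
      rw [if_neg (fun h => hc h.1), if_neg hncl, if_neg hc, if_pos hone]
      rfl
  -- n ≥ 2
  · have hn2 : 1 < s.toList.length := by
      simp only [PySem.Str.len_eq] at hone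
      omega
    have hhead : s.toList.head? = some c := by rw [hct]; rfl
    by_cases hl : last = '0'
    · -- trailing zero: B's loop adds nothing
      have hfold := foldB_last0 s PySem.Set.empty (by rw [hlast?, hl])
      by_cases hc : c = '0'
      · rw [if_pos ⟨hc, hl⟩, if_neg hone, hfold, if_neg hone, if_neg (not_not_intro hc)]
      · rw [if_neg (fun h => hc h.1), if_pos hl, hfold, if_neg hone, if_pos hc]
    · -- no trailing zero
      by_cases hc : c = '0'
      · rw [if_neg (fun h => hl h.2), if_neg hl, if_pos hc]
        rw [foldB_lead0 s PySem.Set.empty (by rw [hhead, hc]) (by rw [hlast?]; exact fun h => hl (Option.some.inj h)) hn2]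
        rw [if_neg hone, if_neg (not_not_intro hc)]
      · rw [if_neg (fun h => hc h.1), if_neg hl, if_neg hc]
        rw [foldB_all s PySem.Set.empty
          (by rw [hhead]; exact fun h => hc (Option.some.inj h))
          (by rw [hlast?]; exact fun h => hl (Option.some.inj h))]
        rw [if_neg hone, if_pos hc]
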